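-- pv_equiv track=rewrite | github.com/thugdang/study-python | Bai6 Tr34.py | tao_list_chan
-- ===== SOURCE A (Python) =====
-- def tao_list_chan(l):
--     l_chan = []
--     for i in l:
--         if i % 10 == 0:
--             l_chan.append(i)
--             return l_chan
--         elif i % 2 == 0:
--             l_chan.append(i)
--     return l_chan
-- ===== SOURCE B (Python) =====
-- def tao_list_chan(l):
--     l = list(l)
--     stop = len(l)
--     for idx, x in enumerate(l):
--         if x % 10 == 0:
--             stop = idx
--             break
--     return [x for x in l[:stop + 1] if x % 2 == 0]
-- ===== Notes on version B (the rewrite author's own statement) =====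
-- stated objective: alternative
-- what changed: Replaces A's interleaved append-and-early-return loop with two separate passes: first locate the index of the first multiple of ten, then filter the evens out of the prefix up to and including it.
import Mathlib
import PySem

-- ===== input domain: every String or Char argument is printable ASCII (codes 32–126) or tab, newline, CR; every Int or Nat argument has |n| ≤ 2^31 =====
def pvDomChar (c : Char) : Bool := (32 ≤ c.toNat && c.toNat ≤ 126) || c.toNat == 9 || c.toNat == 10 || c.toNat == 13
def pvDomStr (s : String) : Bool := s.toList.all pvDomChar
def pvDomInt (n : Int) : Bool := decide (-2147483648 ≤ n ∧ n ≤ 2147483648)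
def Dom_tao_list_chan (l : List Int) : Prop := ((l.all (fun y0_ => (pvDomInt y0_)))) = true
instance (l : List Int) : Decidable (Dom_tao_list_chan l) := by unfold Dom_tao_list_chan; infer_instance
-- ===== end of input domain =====

-- B replaces A's interleaved append-and-early-return loop with two passes: locate the
-- first multiple of ten, then filter evens from the prefix up to and including it
-- (objective: alternative decomposition, same cost).

-- ===== PORT A =====
-- the for-loop with early return, accumulator l_chan = acc
def pvALoop (l : List Int) (acc : List Int) : List Int :=
  match l with
  | [] => acc
  | i :: t =>
    if PySem.Int.mod i 10 == 0 then acc ++ [i]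
    else if PySem.Int.mod i 2 == 0 then pvALoop t (acc ++ [i])
    else pvALoop t acc

def tao_list_chan (l : List Int) : List Int := pvALoop l []

-- ===== PORT B =====
-- first pass: index of the first multiple of ten (len l if none), idx is the enumerate counter
def pvBStop (l : List Int) (idx : Nat) : Nat :=
  match l with
  | [] => idx
  | x :: t => if PySem.Int.mod x 10 == 0 then idx else pvBStop t (idx + 1)

def tao_list_chan_alt (l : List Int) : List Int :=
  let stop := pvBStop l 0
  (PySem.List.slice l none (some ((stop : Int) + 1))).filter (fun x => PySem.Int.mod x 2 == 0)

-- ===== PRECONDITION & SPEC =====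
def Spec_tao_list_chan (l : List Int) (out : List Int) : Prop := out = tao_list_chan_alt l
instance (l : List Int) (out : List Int) : Decidable (Spec_tao_list_chan l out) := by unfold Spec_tao_list_chan; infer_instance

-- ===== CLAIM (what is proved, stated in full; the proofs are below) =====
def Claim_equal_tao_list_chan : Prop := ∀ (l : List Int), Dom_tao_list_chan l → Spec_tao_list_chan l (tao_list_chan l)

-- ===== LEMMAS AND PROOFS =====
theorem pvBStop_shift (l : List Int) (idx : Nat) : pvBStop l idx = pvBStop l 0 + idx := by
  induction l generalizing idx with
  | nil => simp [pvBStop]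
  | cons x t ih =>
    simp only [pvBStop]
    split
    · simp
    · rw [ih (idx + 1), ih 1]; omega

theorem pvALoop_eq (l : List Int) (acc : List Int) :
    pvALoop l acc = acc ++ (l.take (pvBStop l 0 + 1)).filter (fun x => PySem.Int.mod x 2 == 0) := by
  induction l generalizing acc with
  | nil => simp [pvALoop]
  | cons i t ih =>
    by_cases hd10 : (10 : Int) ∣ i
    · have hd2 : (2 : Int) ∣ i := dvd_trans ⟨5, rfl⟩ hd10
      simp [pvALoop, pvBStop, hd10, hd2]
    · have hstop : pvBStop (i :: t) 0 = pvBStop t 0 + 1 := by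
        simp only [pvBStop]
        rw [if_neg (by simp [hd10])]
        exact pvBStop_shift t 1
      rw [hstop]
      by_cases hd2 : (2 : Int) ∣ i
      · simp [pvALoop, hd10, hd2, ih]
      · simp [pvALoop, hd10, hd2, ih]

theorem alt_eq_take (l : List Int) :
    tao_list_chan_alt l = (l.take (pvBStop l 0 + 1)).filter (fun x => PySem.Int.mod x 2 == 0) := by
  unfold tao_list_chan_alt
  simp only []
  have h : ((pvBStop l 0 : Int) + 1) = ((pvBStop l 0 + 1 : Nat) : Int) := by push_cast; ring
  rw [h, PySem.List.slice_to_natCast]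

-- ===== VERDICT (by name: the statement is the Claim_ definition above) =====
theorem tao_list_chan_spec : Claim_equal_tao_list_chan := by
  intro l _
  unfold Spec_tao_list_chan tao_list_chan
  rw [alt_eq_take, pvALoop_eq]
  simp
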